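-- pv_equiv track=rewrite | github.com/oleg121203/AI-SYSTEMS-REPO | ai-systems/ai-core/main.py | _prioritize_tasks
-- ===== SOURCE A (Python) =====
-- from typing import Any, Dict, List, Optional, Union
--
-- def _prioritize_tasks(task_ids: List[str]) -> List[str]:
--     """Prioritize tasks based on dependencies and importance"""
--     # Special case: idea.md should always be first
--     prioritized = []
--     regular = []
--
--     for task_id in task_ids:
--         if "idea.md" in task_id:
--             prioritized.append(task_id)
--         else:
--             regular.append(task_id)
--
--     # Sort by role: executor first, then tester, then documenter
--     executor_tasks = [t for t in regular if t.startswith("executor:")]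
--     tester_tasks = [t for t in regular if t.startswith("tester:")]
--     documenter_tasks = [t for t in regular if t.startswith("documenter:")]
--
--     return prioritized + executor_tasks + tester_tasks + documenter_tasks
-- ===== SOURCE B (Python) =====
-- def _prioritize_tasks(task_ids):
--     """Prioritize tasks based on dependencies and importance"""
--     def _priority(task_id):
--         if "idea.md" in task_id:
--             return 0
--         if task_id.startswith("executor:"):
--             return 1
--         if task_id.startswith("tester:"):
--             return 2
--         if task_id.startswith("documenter:"):
--             return 3
--         return None
--     keyed = [(_priority(t), t) for t in task_ids]
--     keyed = [kt for kt in keyed if kt[0] is not None]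
--     return [t for _, t in sorted(keyed, key=lambda kt: kt[0])]
-- ===== Notes on version B (the rewrite author's own statement) =====
-- stated objective: alternative
-- what changed: Replaces the two-pass bucket construction (idea/regular split plus three prefix filters concatenated) with a single priority-key function, one filtering pass building (priority, task) pairs, and a stable sort by priority.
import Mathlib
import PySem

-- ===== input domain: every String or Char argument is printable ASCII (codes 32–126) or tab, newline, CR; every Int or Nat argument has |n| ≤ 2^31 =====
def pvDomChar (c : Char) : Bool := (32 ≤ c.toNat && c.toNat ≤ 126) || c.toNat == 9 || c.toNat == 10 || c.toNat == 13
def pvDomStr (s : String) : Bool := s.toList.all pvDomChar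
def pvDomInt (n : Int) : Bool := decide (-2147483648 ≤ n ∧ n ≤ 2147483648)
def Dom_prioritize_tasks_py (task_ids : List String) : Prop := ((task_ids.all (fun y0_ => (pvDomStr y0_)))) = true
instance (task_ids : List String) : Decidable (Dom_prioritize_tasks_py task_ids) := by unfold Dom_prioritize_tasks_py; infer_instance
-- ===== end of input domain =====

-- B replaces A's bucket lists (idea split + three prefix filters, concatenated)
-- by a priority-key table filtered of unmatched tasks and a stable sort by priority.

-- ===== PORT A =====
def prioritize_tasks_py (task_ids : List String) : List String :=
  let pr := task_ids.foldl
    (fun (acc : List String × List String) task_id =>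
      if PySem.Str.isIn "idea.md" task_id then (acc.1 ++ [task_id], acc.2)
      else (acc.1, acc.2 ++ [task_id]))
    ([], [])
  let prioritized := pr.1
  let regular := pr.2
  let executor_tasks := regular.filter (fun t => PySem.Str.startswith t "executor:")
  let tester_tasks := regular.filter (fun t => PySem.Str.startswith t "tester:")
  let documenter_tasks := regular.filter (fun t => PySem.Str.startswith t "documenter:")
  prioritized ++ executor_tasks ++ tester_tasks ++ documenter_tasks

-- ===== PORT B =====
def pvPriority (task_id : String) : Option Int :=
  if PySem.Str.isIn "idea.md" task_id then some 0
  else if PySem.Str.startswith task_id "executor:" then some 1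
  else if PySem.Str.startswith task_id "tester:" then some 2
  else if PySem.Str.startswith task_id "documenter:" then some 3
  else none

def prioritize_tasks_py_alt (task_ids : List String) : List String :=
  let keyed := task_ids.filterMap (fun t => (pvPriority t).map (fun p => (p, t)))
  (PySem.List.sorted keyed (fun kt => kt.1) false).map (fun kt => kt.2)

-- ===== PRECONDITION & SPEC =====
def Spec_prioritize_tasks_py (task_ids : List String) (out : List String) : Prop := out = prioritize_tasks_py_alt task_ids
instance (task_ids : List String) (out : List String) : Decidable (Spec_prioritize_tasks_py task_ids out) := by unfold Spec_prioritize_tasks_py; infer_instance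

-- ===== CLAIM (what is proved, stated in full; the proofs are below) =====
def Claim_equal_prioritize_tasks_py : Prop := ∀ (task_ids : List String), Dom_prioritize_tasks_py task_ids → Spec_prioritize_tasks_py task_ids (prioritize_tasks_py task_ids)

-- ===== LEMMAS AND PROOFS =====

-- A's first loop is the two filters (idea / non-idea), for any accumulator.
theorem pv_split_loop (l : List String) (a b : List String) :
    l.foldl
      (fun (acc : List String × List String) task_id =>
        if PySem.Str.isIn "idea.md" task_id then (acc.1 ++ [task_id], acc.2)
        else (acc.1, acc.2 ++ [task_id]))
      (a, b)
    = (a ++ l.filter (fun t => PySem.Str.isIn "idea.md" t),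
       b ++ l.filter (fun t => !PySem.Str.isIn "idea.md" t)) := by
  induction l generalizing a b with
  | nil => simp
  | cons x xs ih =>
    rw [List.foldl_cons]
    by_cases h : PySem.Str.isIn "idea.md" x
    · rw [if_pos h, ih]
      simp only [List.filter_cons]
      rw [h]
      simp
    · rw [if_neg h, ih]
      simp only [List.filter_cons]
      rw [Bool.of_not_eq_true h]
      simp

-- Inserting past a block that never satisfies `before`.
theorem pv_insertBy_append {α : Type} (before : α → α → Bool) (x : α) (ys zs : List α)
    (h : ∀ y ∈ ys, before x y = false) :
    PySem.List.insertBy before x (ys ++ zs) = ys ++ PySem.List.insertBy before x zs := by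
  induction ys with
  | nil => simp
  | cons y ys ih =>
    have hy : before x y = false := h y (by simp)
    simp [PySem.List.insertBy, hy, ih (fun z hz => h z (by simp [hz]))]

theorem pv_insertBy_front {α : Type} (before : α → α → Bool) (x : α) (zs : List α)
    (h : ∀ z ∈ zs, before x z = true) :
    PySem.List.insertBy before x zs = x :: zs := by
  cases zs with
  | nil => simp [PySem.List.insertBy]
  | cons z t => simp [PySem.List.insertBy, h z (by simp)]

-- An element of the key-j bucket has key j.
theorem pv_key_bucket {j : Int} {xs : List (Int × String)} {y : Int × String}
    (hy : y ∈ xs.filter (fun kt => kt.1 == j)) : y.1 = j := by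
  have := (List.mem_filter.mp hy).2
  simpa using this

-- Stable sort over keys in {0,1,2,3} is the four key-buckets in order.
theorem pv_sorted_buckets (l : List (Int × String))
    (h : ∀ kt ∈ l, kt.1 = 0 ∨ kt.1 = 1 ∨ kt.1 = 2 ∨ kt.1 = 3) :
    PySem.List.sorted l (fun kt => kt.1) false
      = l.filter (fun kt => kt.1 == 0) ++ l.filter (fun kt => kt.1 == 1)
        ++ l.filter (fun kt => kt.1 == 2) ++ l.filter (fun kt => kt.1 == 3) := by
  rw [PySem.List.sorted_eq_foldl_insertBy]
  induction l using List.reverseRecOn with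
  | nil => simp
  | append_singleton xs x ih =>
    have hx := h x (by simp)
    have hxs : ∀ kt ∈ xs, kt.1 = 0 ∨ kt.1 = 1 ∨ kt.1 = 2 ∨ kt.1 = 3 :=
      fun kt hkt => h kt (by simp [hkt])
    rw [List.foldl_append, List.foldl_cons, List.foldl_nil, ih hxs,
        List.append_assoc, List.append_assoc]
    rcases hx with h0 | h1 | h2 | h3
    · rw [pv_insertBy_append _ x _ _
            (fun y hy => by simp [pv_key_bucket hy, h0]),
          pv_insertBy_front _ x _ ?_]
      · simp [List.filter_append, h0]
      · intro z hz
        rcases List.mem_append.mp hz with hb | hz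
        · simp [pv_key_bucket hb, h0]
        · rcases List.mem_append.mp hz with hb | hb
          · simp [pv_key_bucket hb, h0]
          · simp [pv_key_bucket hb, h0]
    · rw [pv_insertBy_append _ x _ _
            (fun y hy => by simp [pv_key_bucket hy, h1]),
          pv_insertBy_append _ x _ _
            (fun y hy => by simp [pv_key_bucket hy, h1]),
          pv_insertBy_front _ x _ ?_]
      · simp [List.filter_append, h1]
      · intro z hz
        rcases List.mem_append.mp hz with hb | hb
        · simp [pv_key_bucket hb, h1]
        · simp [pv_key_bucket hb, h1]
    · rw [pv_insertBy_append _ x _ _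
            (fun y hy => by simp [pv_key_bucket hy, h2]),
          pv_insertBy_append _ x _ _
            (fun y hy => by simp [pv_key_bucket hy, h2]),
          pv_insertBy_append _ x _ _
            (fun y hy => by simp [pv_key_bucket hy, h2]),
          pv_insertBy_front _ x _
            (fun z hz => by simp [pv_key_bucket hz, h2])]
      simp [List.filter_append, h2]
    · rw [pv_insertBy_append _ x _ _
            (fun y hy => by simp [pv_key_bucket hy, h3]),
          pv_insertBy_append _ x _ _
            (fun y hy => by simp [pv_key_bucket hy, h3]),
          pv_insertBy_append _ x _ _
            (fun y hy => by simp [pv_key_bucket hy, h3]),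
          PySem.List.insertBy_of_forall_not_before _ x _
            (fun y hy => by simp [pv_key_bucket hy, h3])]
      simp [List.filter_append, h3]

-- The key-k bucket of the keyed table, projected to tasks, is the filter by priority k.
theorem pv_bucket_keyed (k : Int) (l : List String) :
    ((l.filterMap (fun t => (pvPriority t).map (fun p => (p, t)))).filter
        (fun kt => kt.1 == k)).map (fun kt => kt.2)
      = l.filter (fun t => pvPriority t == some k) := by
  induction l with
  | nil => rfl
  | cons t ts ih =>
    cases hp : pvPriority t with
    | none => simp [hp, ih]
    | some p =>
      by_cases hk : p = k
      · simp [hp, hk, ih]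
      · simp [hp, hk, ih]

-- pvPriority only takes the values 0..3.
theorem pv_priority_values (t : String) (p : Int) (hp : pvPriority t = some p) :
    p = 0 ∨ p = 1 ∨ p = 2 ∨ p = 3 := by
  unfold pvPriority at hp
  split_ifs at hp <;> simp_all

-- Two of the three role prefixes never both hold (they differ at the first character).
theorem pv_startswith_head {t : String} {a b : Char} {xs ys : List Char}
    (h1 : PySem.Chars.startswith t.toList (a :: xs) = true)
    (h2 : PySem.Chars.startswith t.toList (b :: ys) = true) : a = b := by
  rw [PySem.Chars.startswith_iff] at h1 h2
  rcases h1 with ⟨u, hu⟩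
  rcases h2 with ⟨v, hv⟩
  rw [← hu] at hv
  have hheads := congrArg List.head? hv
  simpa using hheads.symm

theorem pv_excl_et {t : String}
    (h : PySem.Chars.startswith t.toList ['e','x','e','c','u','t','o','r',':'] = true) :
    PySem.Chars.startswith t.toList ['t','e','s','t','e','r',':'] = false := by
  cases hq : PySem.Chars.startswith t.toList ['t','e','s','t','e','r',':'] with
  | false => rfl
  | true => exact absurd (pv_startswith_head h hq) (by decide)

theorem pv_excl_ed {t : String}
    (h : PySem.Chars.startswith t.toList ['e','x','e','c','u','t','o','r',':'] = true) :
    PySem.Chars.startswith t.toList ['d','o','c','u','m','e','n','t','e','r',':'] = false := by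
  cases hq : PySem.Chars.startswith t.toList ['d','o','c','u','m','e','n','t','e','r',':'] with
  | false => rfl
  | true => exact absurd (pv_startswith_head h hq) (by decide)

theorem pv_excl_td {t : String}
    (h : PySem.Chars.startswith t.toList ['t','e','s','t','e','r',':'] = true) :
    PySem.Chars.startswith t.toList ['d','o','c','u','m','e','n','t','e','r',':'] = false := by
  cases hq : PySem.Chars.startswith t.toList ['d','o','c','u','m','e','n','t','e','r',':'] with
  | false => rfl
  | true => exact absurd (pv_startswith_head h hq) (by decide)

-- ===== VERDICT (by name: the statement is the Claim_ definition above) =====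
theorem prioritize_tasks_py_spec : Claim_equal_prioritize_tasks_py := by
  intro task_ids _
  unfold Spec_prioritize_tasks_py prioritize_tasks_py prioritize_tasks_py_alt
  dsimp only
  rw [pv_split_loop task_ids [] []]
  have hkeys : ∀ kt ∈ task_ids.filterMap (fun t => (pvPriority t).map (fun p => (p, t))),
      kt.1 = 0 ∨ kt.1 = 1 ∨ kt.1 = 2 ∨ kt.1 = 3 := by
    intro kt hkt
    rcases List.mem_filterMap.mp hkt with ⟨t, -, ht⟩
    cases hp : pvPriority t with
    | none => rw [hp] at ht; simp at ht
    | some p =>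
      rw [hp] at ht
      simp only [Option.map_some, Option.some.injEq] at ht
      subst ht
      exact pv_priority_values t p hp
  rw [pv_sorted_buckets _ hkeys]
  simp only [List.map_append, pv_bucket_keyed]
  have e0 : task_ids.filter (fun t => pvPriority t == some 0)
      = task_ids.filter (fun t => PySem.Str.isIn "idea.md" t) := by
    apply List.filter_congr; intro t _
    unfold pvPriority; split_ifs <;> simp_all
  have e1 : task_ids.filter (fun t => pvPriority t == some 1)
      = (task_ids.filter (fun t => !PySem.Str.isIn "idea.md" t)).filter
          (fun t => PySem.Str.startswith t "executor:") := by
    rw [List.filter_filter]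
    apply List.filter_congr; intro t _
    unfold pvPriority; split_ifs <;> simp_all
  have e2 : task_ids.filter (fun t => pvPriority t == some 2)
      = (task_ids.filter (fun t => !PySem.Str.isIn "idea.md" t)).filter
          (fun t => PySem.Str.startswith t "tester:") := by
    rw [List.filter_filter]
    apply List.filter_congr; intro t _
    unfold pvPriority; split_ifs <;> simp_all [pv_excl_et]
  have e3 : task_ids.filter (fun t => pvPriority t == some 3)
      = (task_ids.filter (fun t => !PySem.Str.isIn "idea.md" t)).filter
          (fun t => PySem.Str.startswith t "documenter:") := by
    rw [List.filter_filter]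
    apply List.filter_congr; intro t _
    unfold pvPriority; split_ifs <;> simp_all [pv_excl_ed, pv_excl_td]
  rw [e0, e1, e2, e3]
  simp
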